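-- pv_equiv track=rewrite | github.com/alexpostnikov/Backprop-MPDM_torch | scripts/validation.py | get_starting_time
-- ===== SOURCE A (Python) =====
-- def unique(list1):
--
--     # intilize a null list
--     unique_list = []
--
--     # traverse for all elements
--     for row in list1:
--         for x in row:
--             # check if exists in unique_list or not
--             if x not in unique_list:
--                 unique_list.append(x)
--     # print list
-- #     for x in unique_list:
-- #         print (x,)
--     return unique_list
--
-- def get_starting_time(pedlist,ped_poses):
--     ped_nums = unique(pedlist)
--     starting_episode = {}
--     for i in ped_nums:
--         starting_episode[i] = None
--     for i,index in enumerate(range(0,len(ped_poses)-1)):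
--         for col in ped_poses[i]:
--             if int(col[0]) in starting_episode.keys():
--                 if starting_episode[int(col[0])] is None :
--                     starting_episode[int(col[0])] = i
--     return starting_episode
-- ===== SOURCE B (Python) =====
-- def get_starting_time(pedlist, ped_poses):
--     # collect unique ped ids in first-occurrence order (seen-set instead of list scans)
--     keys = []
--     seen = set()
--     for row in pedlist:
--         for x in row:
--             if x not in seen:
--                 seen.add(x)
--                 keys.append(x)
--     # per-key scan over timesteps (last timestep excluded, as in the original)
--     n = len(ped_poses) - 1
--     starting_episode = {}
--     for k in keys:
--         first = None
--         for i in range(n):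
--             if any(int(col[0]) == k for col in ped_poses[i]):
--                 first = i
--                 break
--         starting_episode[k] = first
--     return starting_episode
-- ===== Notes on version B (the rewrite author's own statement) =====
-- stated objective: alternative
-- what changed: B dedups ids with a seen-set in one flat pass instead of quadratic list scans, and swaps the loop nesting: for each id it scans timesteps until the first hit (with early break) instead of A's single forward pass updating a None-seeded dict.
import Mathlib
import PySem

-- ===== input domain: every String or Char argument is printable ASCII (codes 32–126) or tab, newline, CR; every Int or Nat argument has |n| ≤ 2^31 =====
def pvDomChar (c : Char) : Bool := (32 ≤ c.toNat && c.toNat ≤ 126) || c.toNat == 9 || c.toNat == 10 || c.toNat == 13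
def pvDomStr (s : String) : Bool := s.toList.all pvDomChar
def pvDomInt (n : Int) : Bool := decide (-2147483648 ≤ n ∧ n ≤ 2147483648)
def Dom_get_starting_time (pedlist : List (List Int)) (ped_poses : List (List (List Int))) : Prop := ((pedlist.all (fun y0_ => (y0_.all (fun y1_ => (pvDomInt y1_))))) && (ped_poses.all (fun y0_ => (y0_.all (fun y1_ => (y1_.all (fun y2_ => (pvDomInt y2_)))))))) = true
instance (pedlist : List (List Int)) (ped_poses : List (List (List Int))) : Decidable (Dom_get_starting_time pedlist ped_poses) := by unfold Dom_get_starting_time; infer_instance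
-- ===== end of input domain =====

-- B replaces A's quadratic dedup and single forward pass over timesteps by a seen-set dedup and
-- a per-id scan of the timesteps with early exit (objective: alternative decomposition, same cost class).

-- ===== PORT A =====
-- A's helper `unique`: nested loops appending first occurrences
def pvUnique (pedlist : List (List Int)) : List Int :=
  pedlist.foldl (fun ul row => row.foldl (fun ul x => if x ∈ ul then ul else ul ++ [x]) ul) []

-- `if int(col[0]) in starting_episode.keys(): if starting_episode[k] is None: starting_episode[k] = v`
-- (lookup = some none combines the membership test and the is-None test; assignment overwrites in place)
def pvSetIfNone (d : List (Int × Option Int)) (k : Int) (v : Int) : List (Int × Option Int) :=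
  if d.lookup k = some none then d.map (fun p => if p.1 = k then (p.1, some v) else p) else d

-- `col[0]` is ported as `col.headD 0`: exact for the nonempty columns Pre_ admits (Python raises IndexError on an empty column)
def get_starting_time (pedlist : List (List Int)) (ped_poses : List (List (List Int))) : List (Int × Option Int) :=
  let d0 := (pvUnique pedlist).map (fun k => (k, (none : Option Int)))
  (List.range (ped_poses.length - 1)).foldl
    (fun d i => (ped_poses.getD i []).foldl (fun d col => pvSetIfNone d (col.headD 0) (i : Int)) d) d0

-- ===== PORT B =====
-- Source B's inner loop: scan timesteps i = i, i+1, … of `rows`, return the first index whose row contains k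
def pvFirstIdx (rows : List (List (List Int))) (k : Int) (i : Nat) : Option Int :=
  match rows with
  | [] => none
  | r :: rs => if r.any (fun col => col.headD 0 = k) then some (i : Int) else pvFirstIdx rs k (i + 1)

def get_starting_time_alt (pedlist : List (List Int)) (ped_poses : List (List (List Int))) : List (Int × Option Int) :=
  -- seen-set dedup over the flattened pedlist (state = (keys, seen))
  let keys := (pedlist.flatten.foldl
      (fun (st : List Int × PySem.Set Int) x =>
        if x ∈ st.2 then st else (st.1 ++ [x], PySem.Set.add st.2 x)) ([], PySem.Set.empty)).1
  keys.map (fun k => (k, pvFirstIdx (ped_poses.take (ped_poses.length - 1)) k 0))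

-- ===== PRECONDITION & SPEC =====
-- Pre_ excludes exactly the inputs where Python A raises IndexError: an empty column in one of the scanned
-- timesteps (all but the last).
def Pre_get_starting_time (pedlist : List (List Int)) (ped_poses : List (List (List Int))) : Prop :=
  ∀ row ∈ ped_poses.take (ped_poses.length - 1), ∀ col ∈ row, col ≠ []
instance (pedlist : List (List Int)) (ped_poses : List (List (List Int))) : Decidable (Pre_get_starting_time pedlist ped_poses) := by unfold Pre_get_starting_time; infer_instance

def pvWitness_get_starting_time : List (List Int) × List (List (List Int)) :=
  ([[1], [2]], [[[1, 0]], [[2, 0]], [[9]]])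

def Spec_get_starting_time (pedlist : List (List Int)) (ped_poses : List (List (List Int))) (out : List (Int × Option Int)) : Prop := out = get_starting_time_alt pedlist ped_poses
instance (pedlist : List (List Int)) (ped_poses : List (List (List Int))) (out : List (Int × Option Int)) : Decidable (Spec_get_starting_time pedlist ped_poses out) := by unfold Spec_get_starting_time; infer_instance

-- ===== CLAIM (what is proved, stated in full; the proofs are below) =====
def Claim_equal_get_starting_time : Prop := ∀ (pedlist : List (List Int)) (ped_poses : List (List (List Int))), Dom_get_starting_time pedlist ped_poses → Pre_get_starting_time pedlist ped_poses → Spec_get_starting_time pedlist ped_poses (get_starting_time pedlist ped_poses)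

-- ===== LEMMAS AND PROOFS =====

-- B's seen-set dedup equals A's list-scan dedup (invariant: seen has the same members as keys)
lemma pvSeenFold (l : List Int) : ∀ (keys : List Int) (s : PySem.Set Int),
    (∀ x : Int, x ∈ s ↔ x ∈ keys) →
    (l.foldl (fun (st : List Int × PySem.Set Int) x =>
        if x ∈ st.2 then st else (st.1 ++ [x], PySem.Set.add st.2 x)) (keys, s)).1
      = l.foldl (fun ul x => if x ∈ ul then ul else ul ++ [x]) keys := by
  induction l with
  | nil => intro keys s _; simp
  | cons a l ih =>
    intro keys s hs
    by_cases ha : a ∈ keys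
    · simpa [List.foldl_cons, (hs a).mpr ha, ha] using ih keys s hs
    · have ha' : ¬ a ∈ s := fun h => ha ((hs a).mp h)
      simp only [List.foldl_cons, ha, ha', if_neg]
      exact ih (keys ++ [a]) (PySem.Set.add s a) (by
        intro x
        rw [PySem.Set.mem_add]
        simp [hs x, or_comm])

lemma pvKeysEq (pedlist : List (List Int)) :
    (pedlist.flatten.foldl
      (fun (st : List Int × PySem.Set Int) x =>
        if x ∈ st.2 then st else (st.1 ++ [x], PySem.Set.add st.2 x)) ([], PySem.Set.empty)).1
    = pvUnique pedlist := by
  rw [pvSeenFold _ [] PySem.Set.empty (by intro x; simp [PySem.Set.empty])]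
  rw [pvUnique, List.foldl_flatten]

lemma pvLookupMap (keys : List Int) (f : Int → Option Int) (k : Int) :
    (keys.map (fun j => (j, f j))).lookup k = if k ∈ keys then some (f k) else none := by
  induction keys with
  | nil => simp
  | cons a keys ih =>
    by_cases h : k = a
    · subst h; simp [List.lookup]
    · have hb : (k == a) = false := by simp [h]
      simp [List.lookup, hb, ih, h]

lemma pvSetIfNoneMap (keys : List Int) (f : Int → Option Int) (k v : Int) :
    pvSetIfNone (keys.map (fun j => (j, f j))) k v
      = keys.map (fun j => (j, if j = k ∧ f k = none then some v else f j)) := by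
  rw [pvSetIfNone, pvLookupMap]
  by_cases hk : k ∈ keys
  · cases hf : f k with
    | none =>
      simp only [hk, if_true, hf, if_pos rfl, List.map_map]
      apply List.map_congr_left
      intro j _
      by_cases hj : j = k
      · simp [hj, hf]
      · simp [hj]
    | some w =>
      simp only [hk, if_true, hf, reduceIte]
      apply List.map_congr_left
      intro j _
      by_cases hj : j = k
      · simp [hj, hf]
      · simp [hj]
  · simp only [hk, if_false, reduceIte]
    apply List.map_congr_left
    intro j hj
    have : ¬ j = k := fun e => hk (e ▸ hj)
    simp [this]

-- one timestep of A: folding pvSetIfNone over the columns fills exactly the still-None ids the row contains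
lemma pvColsFold (cols : List (List Int)) (i : Int) : ∀ (keys : List Int) (f : Int → Option Int),
    cols.foldl (fun d col => pvSetIfNone d (col.headD 0) i) (keys.map (fun j => (j, f j)))
      = keys.map (fun j => (j, if f j = none ∧ cols.any (fun c => c.headD 0 = j) then some i else f j)) := by
  induction cols with
  | nil => intro keys f; simp
  | cons c cs ih =>
    intro keys f
    rw [List.foldl_cons, pvSetIfNoneMap, ih]
    apply List.map_congr_left
    intro j _
    congr 1
    rw [List.any_cons]
    generalize c.headD 0 = y
    by_cases h1 : j = y
    · subst h1; cases hf : f j <;> simp [hf]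
    · cases hf : f j <;> simp [h1, Ne.symm h1, hf]

lemma pvFirstIdxAppend (rs : List (List (List Int))) (r : List (List Int)) (k : Int) :
    ∀ i : Nat, pvFirstIdx (rs ++ [r]) k i
      = match pvFirstIdx rs k i with
        | some v => some v
        | none => if r.any (fun col => col.headD 0 = k)
                  then some ((i + rs.length : Nat) : Int) else none := by
  induction rs with
  | nil => intro i; simp [pvFirstIdx]
  | cons r' rs ih =>
    intro i
    cases h : r'.any (fun col => col.headD 0 = k) with
    | true => simp only [List.cons_append, pvFirstIdx, h, if_true]
    | false =>
      have e : (i + 1 + rs.length : Nat) = (i + (rs.length + 1) : Nat) := by omega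
      simp only [List.cons_append, pvFirstIdx, h, Bool.false_eq_true, if_false, ih (i + 1), e,
        List.length_cons]

-- the main invariant: after scanning timesteps 0..n-1, A's dict equals B's per-id first-hit values on take n
lemma pvRangeFold (ped_poses : List (List (List Int))) (keys : List Int) :
    ∀ n, n ≤ ped_poses.length →
    (List.range n).foldl
        (fun d i => (ped_poses.getD i []).foldl (fun d col => pvSetIfNone d (col.headD 0) (i : Int)) d)
        (keys.map (fun j => (j, (none : Option Int))))
      = keys.map (fun j => (j, pvFirstIdx (ped_poses.take n) j 0)) := by
  intro n
  induction n with
  | zero => intro _; simp [pvFirstIdx]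
  | succ n ih =>
    intro hn
    have hn' : n < ped_poses.length := hn
    rw [List.range_succ, List.foldl_append, ih (Nat.le_of_lt hn'), List.foldl_cons, List.foldl_nil,
        List.getD_eq_getElem _ _ hn', pvColsFold]
    apply List.map_congr_left
    intro j _
    have htake : ped_poses.take (n + 1) = ped_poses.take n ++ [ped_poses[n]] := by
      rw [List.take_add_one]
      simp [List.getElem?_eq_getElem hn']
    rw [htake, pvFirstIdxAppend, congrArg Prod.mk rfl]
    have hlen : (ped_poses.take n).length = n := by simp [Nat.le_of_lt hn']
    cases hfj : pvFirstIdx (ped_poses.take n) j 0 with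
    | some v => simp [hfj]
    | none => cases h : (ped_poses[n]!).any (fun col => col.headD 0 = j) <;>
        simp_all [hlen]

-- ===== VERDICT (by name: the statement is the Claim_ definition above) =====
theorem get_starting_time_spec : Claim_equal_get_starting_time := by
  intro pedlist ped_poses _ _
  unfold Spec_get_starting_time get_starting_time get_starting_time_alt
  rw [pvKeysEq, pvRangeFold ped_poses (pvUnique pedlist) (ped_poses.length - 1) (Nat.sub_le _ _)]
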